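-- pv_equiv track=rewrite | github.com/NiceAfternoon/arknights-mower | arknights_mower/agent/rank_activity_entries.py | _normalize_indices
-- ===== SOURCE A (Python) =====
-- def _normalize_indices(indices, max_len):
--     if not isinstance(indices, list):
--         return []
--     out = []
--     seen = set()
--     for x in indices:
--         if not (isinstance(x, int) or str(x).isdigit()):
--             continue
--         i = int(x)
--         if i < 0 or i >= max_len or i in seen:
--             continue
--         out.append(i)
--         seen.add(i)
--         if len(out) >= 5:
--             break
--     return out
-- ===== SOURCE B (Python) =====
-- def _normalize_indices(indices, max_len):
--     if not isinstance(indices, list):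
--         return []
--     valid = [int(x) for x in indices
--              if (isinstance(x, int) or str(x).isdigit()) and 0 <= int(x) < max_len]
--     return list(dict.fromkeys(valid))[:5]
-- ===== Notes on version B (the rewrite author's own statement) =====
-- stated objective: simpler
-- what changed: Replaced the fused loop (manual seen-set bookkeeping, append, early break at 5) by three declarative phases: a filtering comprehension, dict.fromkeys for order-preserving dedup, and a [:5] slice.
import Mathlib
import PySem

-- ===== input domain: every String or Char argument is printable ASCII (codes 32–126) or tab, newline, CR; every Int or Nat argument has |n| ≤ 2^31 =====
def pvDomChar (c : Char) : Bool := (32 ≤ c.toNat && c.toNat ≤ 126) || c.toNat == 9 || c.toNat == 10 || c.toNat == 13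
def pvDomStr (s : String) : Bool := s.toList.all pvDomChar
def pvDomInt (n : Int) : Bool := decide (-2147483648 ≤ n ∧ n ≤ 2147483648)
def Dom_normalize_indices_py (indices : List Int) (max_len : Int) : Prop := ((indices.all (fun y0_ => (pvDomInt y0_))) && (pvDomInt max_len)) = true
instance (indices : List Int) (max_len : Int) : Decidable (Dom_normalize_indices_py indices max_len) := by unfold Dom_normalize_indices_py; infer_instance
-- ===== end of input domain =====

-- B rewrites A's fused loop (seen-set bookkeeping, early break at 5) as three phases:
-- filter, dict.fromkeys dedup, [:5] slice; same return value, no speed claim.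

-- ===== PORT A =====
-- A's loop: elements are Int here, so `isinstance(x, int) or str(x).isdigit()` is always true;
-- the loop keeps x unless x < 0, x >= max_len or x in seen, appends, adds to seen, breaks at len 5.
def pvGoA (max_len : Int) : List Int → List Int → PySem.Set Int → List Int
  | [], out, _ => out
  | x :: xs, out, seen =>
    if x < 0 ∨ max_len ≤ x ∨ PySem.Set.contains seen x then
      pvGoA max_len xs out seen
    else
      let out' := out ++ [x]
      let seen' := PySem.Set.add seen x
      if 5 ≤ out'.length then out' else pvGoA max_len xs out' seen'

def normalize_indices_py (indices : List Int) (max_len : Int) : List Int :=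
  pvGoA max_len indices [] PySem.Set.empty

-- ===== PORT B =====
def normalize_indices_py_alt (indices : List Int) (max_len : Int) : List Int :=
  let valid := indices.filter (fun x => decide (0 ≤ x) && decide (x < max_len))
  (PySem.List.dedup valid).take 5

-- ===== PRECONDITION & SPEC =====
def Spec_normalize_indices_py (indices : List Int) (max_len : Int) (out : List Int) : Prop := out = normalize_indices_py_alt indices max_len
instance (indices : List Int) (max_len : Int) (out : List Int) : Decidable (Spec_normalize_indices_py indices max_len out) := by unfold Spec_normalize_indices_py; infer_instance

-- ===== CLAIM (what is proved, stated in full; the proofs are below) =====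
def Claim_equal_normalize_indices_py : Prop := ∀ (indices : List Int) (max_len : Int), Dom_normalize_indices_py indices max_len → Spec_normalize_indices_py indices max_len (normalize_indices_py indices max_len)

-- ===== LEMMAS AND PROOFS =====

-- fused filter + first-occurrence dedup, excluding `seen`
def pvF (max_len : Int) : List Int → List Int → List Int
  | [], _ => []
  | x :: xs, seen =>
    if 0 ≤ x ∧ x < max_len ∧ x ∉ seen then x :: pvF max_len xs (seen ++ [x])
    else pvF max_len xs seen

lemma pvGoA_eq_take (max_len : Int) :
    ∀ (xs out seen : List Int), out.length < 5 →
      pvGoA max_len xs out seen = (out ++ pvF max_len xs seen).take 5 := by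
  intro xs
  induction xs with
  | nil =>
    intro out seen h
    simp [pvGoA, pvF, List.take_of_length_le (Nat.le_of_lt h)]
  | cons x xs ih =>
    intro out seen h
    by_cases hc : 0 ≤ x ∧ x < max_len ∧ x ∉ seen
    · have hmem : PySem.Set.contains seen x = false := by
        simp [PySem.Set.contains]
        exact hc.2.2
      have hadd : PySem.Set.add seen x = seen ++ [x] := by
        simp [PySem.Set.add, PySem.Set.contains, hc.2.2]
      rw [pvGoA]
      rw [if_neg (by simp [PySem.Set.contains, hc.2.2]; omega)]
      simp only [pvF, if_pos hc]
      by_cases h5 : 5 ≤ (out ++ [x]).length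
      · have hlen : (out ++ [x]).length = 5 := by simp at h5 ⊢; omega
        rw [if_pos h5]
        rw [show out ++ x :: pvF max_len xs (seen ++ [x]) =
              (out ++ [x]) ++ pvF max_len xs (seen ++ [x]) by simp]
        rw [← hlen, List.take_left]
      · rw [if_neg h5, hadd, ih _ _ (by omega)]
        simp
    · rw [pvGoA]
      rw [if_pos (by
        simp [PySem.Set.contains]
        by_cases h0 : 0 ≤ x
        · by_cases h1 : x < max_len
          · right; right
            by_contra hn
            exact hc ⟨h0, h1, hn⟩
          · right; left; omega
        · left; omega)]
      rw [pvF, if_neg hc, ih _ _ h]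

lemma pvFoldl_add_eq (max_len : Int) :
    ∀ (xs acc : List Int),
      (xs.filter (fun x => decide (0 ≤ x) && decide (x < max_len))).foldl PySem.Set.add acc
        = acc ++ pvF max_len xs acc := by
  intro xs
  induction xs with
  | nil => intro acc; simp [pvF]
  | cons x xs ih =>
    intro acc
    by_cases hp : 0 ≤ x ∧ x < max_len
    · rw [List.filter_cons_of_pos (by simp [hp.1, hp.2])]
      by_cases hm : x ∈ acc
      · have : PySem.Set.add acc x = acc := by
          simp [PySem.Set.add, PySem.Set.contains, hm]
        rw [List.foldl_cons, this, ih, pvF,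
          if_neg (by intro hc; exact hc.2.2 hm)]
      · have : PySem.Set.add acc x = acc ++ [x] := by
          simp [PySem.Set.add, PySem.Set.contains, hm]
        rw [List.foldl_cons, this, ih, pvF, if_pos ⟨hp.1, hp.2, hm⟩]
        simp
    · rw [List.filter_cons_of_neg (by
        simp only [Bool.and_eq_true, decide_eq_true_eq]
        exact hp)]
      rw [ih, pvF, if_neg (fun hc => hp ⟨hc.1, hc.2.1⟩)]

-- ===== VERDICT (by name: the statement is the Claim_ definition above) =====
theorem normalize_indices_py_spec : Claim_equal_normalize_indices_py := by
  intro indices max_len _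
  show normalize_indices_py indices max_len = normalize_indices_py_alt indices max_len
  unfold normalize_indices_py normalize_indices_py_alt
  rw [pvGoA_eq_take max_len indices [] PySem.Set.empty (by simp)]
  simp only [PySem.List.dedup_eq_ofList, PySem.Set.ofList_eq_foldl]
  rw [pvFoldl_add_eq]
  simp
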